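-- pv_equiv track=rewrite | github.com/aruncancode/gambit.com | game/game.py | pgn_parser
-- ===== SOURCE A (Python) =====
-- def pgn_parser(pgn):
--     out = []
--     cur = []
--     if len(pgn) == 1:
--         return [[pgn[-1], "OG"]]
--     for i in range(0, len(pgn)):
--         cur.append(pgn[i])
--         if i % 2 == 1:
--             out.append(cur)
--             cur = []
--         if i == len(pgn)-1 and len(pgn)%2==1:
--             cur = [pgn[i], "OG"]
--             out.append(cur)
--     return out
-- ===== SOURCE B (Python) =====
-- def pgn_parser(pgn):
--     out = []
--     for i in range(0, len(pgn), 2):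
--         if i + 1 < len(pgn):
--             out.append([pgn[i], pgn[i + 1]])
--         else:
--             out.append([pgn[i], "OG"])
--     return out
-- ===== Notes on version B (the rewrite author's own statement) =====
-- stated objective: idiomatic
-- what changed: Replaces the stride-1 loop with a cur accumulator, a parity flush and two special-case checks (len==1 early return, last-index odd-length patch) by a single stride-2 loop that emits one pair (or [move, "OG"] for a leftover) per step.
import Mathlib
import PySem

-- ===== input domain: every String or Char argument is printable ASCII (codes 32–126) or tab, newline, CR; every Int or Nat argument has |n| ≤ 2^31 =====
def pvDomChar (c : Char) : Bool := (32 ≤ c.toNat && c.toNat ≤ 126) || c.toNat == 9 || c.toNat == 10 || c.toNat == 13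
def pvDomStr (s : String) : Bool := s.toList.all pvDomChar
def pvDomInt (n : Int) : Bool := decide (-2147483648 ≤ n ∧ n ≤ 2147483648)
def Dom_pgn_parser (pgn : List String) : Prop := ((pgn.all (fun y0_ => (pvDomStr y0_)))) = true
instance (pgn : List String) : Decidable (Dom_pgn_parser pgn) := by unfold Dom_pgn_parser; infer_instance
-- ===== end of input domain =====

-- B replaces A's stride-1 loop with a cur accumulator, parity flush and special cases by a single stride-2 loop (idiomatic; same cost).

-- ===== PORT A =====
-- Loop body of A's "for i in range(0, len(pgn))", state (out, cur), v = pgn[i]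
-- (pgn[i] with i drawn from range(0, len(pgn)) is always in range, so pyGetD with a dummy default is exact).
def pgnBody (n : Int) (st : List (List String) × List String) (i : Int) (v : String) :
    List (List String) × List String :=
  let cur := st.2 ++ [v]
  let st1 := if i % 2 == 1 then (st.1 ++ [cur], ([] : List String)) else (st.1, cur)
  if i == n - 1 && n % 2 == 1 then (st1.1 ++ [[v, "OG"]], [v, "OG"]) else st1

def pgn_parser (pgn : List String) : List (List String) :=
  if pgn.length == 1 then
    [[PySem.List.pyGetD pgn (-1) "", "OG"]]
  else
    ((PySem.List.pyRange 0 pgn.length 1).foldl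
      (fun st i => pgnBody pgn.length st i (PySem.List.pyGetD pgn i ""))
      ([], [])).1

-- ===== PORT B =====
-- B's "for i in range(0, len(pgn), 2)" loop; pgn[i] and pgn[i+1] are accessed only in range, so pyGetD is exact.
def pgn_parser_alt (pgn : List String) : List (List String) :=
  (PySem.List.pyRange 0 pgn.length 2).foldl
    (fun out i =>
      if i + 1 < (pgn.length : Int) then
        out ++ [[PySem.List.pyGetD pgn i "", PySem.List.pyGetD pgn (i + 1) ""]]
      else
        out ++ [[PySem.List.pyGetD pgn i "", "OG"]])
    []

-- ===== PRECONDITION & SPEC =====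
def Spec_pgn_parser (pgn : List String) (out : List (List String)) : Prop := out = pgn_parser_alt pgn
instance (pgn : List String) (out : List (List String)) : Decidable (Spec_pgn_parser pgn out) := by unfold Spec_pgn_parser; infer_instance

-- ===== CLAIM (what is proved, stated in full; the proofs are below) =====
def Claim_equal_pgn_parser : Prop := ∀ (pgn : List String), Dom_pgn_parser pgn → Spec_pgn_parser pgn (pgn_parser pgn)

-- ===== LEMMAS AND PROOFS =====

-- proof-side reference function: pairing by structural two-at-a-time recursion
def pairsRec : List String → List (List String)
  | [] => []
  | [x] => [[x, "OG"]]
  | x :: y :: rest => [x, y] :: pairsRec rest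

-- the value of A's leftover accumulator `cur` after processing a suffix starting at an even index
def pgnCur : List String → List String
  | [] => []
  | [x] => [x, "OG"]
  | _ :: _ :: rest => pgnCur rest

theorem pgn_loop_inv (ys : List String) :
    ∀ (s n : Int) (out : List (List String)), s % 2 = 0 → n = s + ys.length →
    (PySem.List.enumerate ys s).foldl (fun st p => pgnBody n st p.1 p.2) (out, []) =
      (out ++ pairsRec ys, pgnCur ys) := by
  induction ys using pairsRec.induct with
  | case1 =>
    intro s n out hs hn
    simp [PySem.List.enumerate_nil, pairsRec, pgnCur]
  | case2 x =>
    intro s n out hs hn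
    simp only [List.length_cons, List.length_nil] at hn
    have h1 : ¬ (s % 2 = 1) := by omega
    have h2 : s = n - 1 := by omega
    have h3 : n % 2 = 1 := by omega
    have h1' : ¬ ((n - 1) % 2 = 1) := by omega
    simp [PySem.List.enumerate_cons, PySem.List.enumerate_nil, List.foldl, pgnBody,
      pairsRec, pgnCur, h1', h2, h3]
  | case3 x y rest ih =>
    intro s n out hs hn
    simp only [List.length_cons] at hn
    have h1 : ¬ (s % 2 = 1) := by omega
    have h2 : ¬ (s = n - 1) := by omega
    have h3 : (s + 1) % 2 = 1 := by omega
    have h4 : ¬ (s + 1 = n - 1) ∨ ¬ (n % 2 = 1) := by omega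
    have hb : pgnBody n (pgnBody n (out, []) s x) (s + 1) y = (out ++ [[x, y]], []) := by
      rcases h4 with h4 | h4 <;>
        simp [pgnBody, h1, h2, h3, h4]
    rw [PySem.List.enumerate_cons, PySem.List.enumerate_cons, List.foldl_cons, List.foldl_cons, hb,
      ih (s + 1 + 1) n (out ++ [[x, y]]) (by omega) (by push_cast at hn ⊢; omega)]
    simp [pairsRec, pgnCur]

theorem pyRange_two_nil (a b : Int) (h : b ≤ a) : PySem.List.pyRange a b 2 = [] := by
  rw [PySem.List.pyRange_of_pos a b (by norm_num)]
  simp [show ¬ (a < b) by omega]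

theorem pyRange_two_cons (a b : Int) (h : a < b) :
    PySem.List.pyRange a b 2 = a :: PySem.List.pyRange (a + 2) b 2 := by
  rw [PySem.List.pyRange_of_pos a b (by norm_num), PySem.List.pyRange_of_pos (a + 2) b (by norm_num)]
  by_cases h2 : a + 2 < b
  · have hn : ((b - a + 2 - 1) / 2).toNat = ((b - (a + 2) + 2 - 1) / 2).toNat + 1 := by omega
    rw [if_pos h, if_pos h2, hn, List.range_succ_eq_map]
    simp [List.map_map, Function.comp]
    intro k _
    ring
  · have hn : ((b - a + 2 - 1) / 2).toNat = 1 := by omega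
    rw [if_pos h, if_neg h2, hn]
    simp

theorem alt_loop_inv (ys : List String) :
    ∀ (pgn : List String) (s : Int) (out : List (List String)), 0 ≤ s →
      ys = pgn.drop s.toNat →
    (PySem.List.pyRange s pgn.length 2).foldl
      (fun out i =>
        if i + 1 < (pgn.length : Int) then
          out ++ [[PySem.List.pyGetD pgn i "", PySem.List.pyGetD pgn (i + 1) ""]]
        else
          out ++ [[PySem.List.pyGetD pgn i "", "OG"]])
      out = out ++ pairsRec ys := by
  induction ys using pairsRec.induct with
  | case1 =>
    intro pgn s out hs hd
    have hlen : (pgn.length : Int) ≤ s := by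
      have := congrArg List.length hd
      simp [List.length_drop] at this
      omega
    rw [pyRange_two_nil _ _ hlen]
    simp [pairsRec]
  | case2 x =>
    intro pgn s out hs hd
    have hlen : s.toNat + 1 = pgn.length := by
      have := congrArg List.length hd
      simp [List.length_drop] at this
      omega
    have hx : PySem.List.pyGetD pgn s "" = x := by
      have h0 : (pgn.drop s.toNat)[0]? = some x := by rw [← hd]; rfl
      rw [List.getElem?_drop] at h0
      simp only [Nat.add_zero] at h0
      rw [PySem.List.pyGetD_of_nonneg pgn "" hs]
      simp [List.getD, h0]
    rw [pyRange_two_cons s pgn.length (by omega)]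
    rw [List.foldl_cons, if_neg (by omega), pyRange_two_nil _ _ (by omega)]
    simp [pairsRec, hx]
  | case3 x y rest ih =>
    intro pgn s out hs hd
    have hlen : s.toNat + 2 ≤ pgn.length := by
      have := congrArg List.length hd
      simp [List.length_drop] at this
      omega
    have hget : ∀ (k : Nat) (z : String), (pgn.drop s.toNat)[k]? = some z →
        PySem.List.pyGetD pgn (s + k) "" = z := by
      intro k z hk
      rw [List.getElem?_drop] at hk
      rw [PySem.List.pyGetD_of_nonneg pgn "" (by omega)]
      have ht : (s + (k : Int)).toNat = s.toNat + k := by omega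
      rw [ht]
      simp [List.getD, hk]
    have hx : PySem.List.pyGetD pgn s "" = x := by
      have := hget 0 x (by rw [← hd]; rfl)
      simpa using this
    have hy : PySem.List.pyGetD pgn (s + 1) "" = y := by
      have := hget 1 y (by rw [← hd]; rfl)
      simpa using this
    have hrest : rest = pgn.drop (s + 1 + 1).toNat := by
      have h2 : pgn.drop ((s + 1 + 1).toNat) = (pgn.drop s.toNat).drop 2 := by
        rw [List.drop_drop]
        congr 1
        omega
      rw [h2, ← hd]
      rfl
    rw [pyRange_two_cons s pgn.length (by omega)]
    rw [List.foldl_cons, if_pos (by omega), hx, hy,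
      show s + 2 = s + 1 + 1 by ring,
      ih pgn (s + 1 + 1) (out ++ [[x, y]]) (by omega) hrest]
    simp [pairsRec]

theorem alt_eq_pairsRec (pgn : List String) : pgn_parser_alt pgn = pairsRec pgn := by
  unfold pgn_parser_alt
  have := alt_loop_inv pgn pgn 0 [] (by decide) (by simp)
  simpa using this

-- ===== VERDICT (by name: the statement is the Claim_ definition above) =====
theorem pgn_parser_spec : Claim_equal_pgn_parser := by
  intro pgn _
  unfold Spec_pgn_parser pgn_parser
  rw [alt_eq_pairsRec]
  by_cases hlen : pgn.length = 1
  · match pgn, hlen with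
    | [x], _ => simp [pairsRec, PySem.List.pyGetD, PySem.List.pyGet?, PySem.List.pyIdx?]
  · have hfold :
        (PySem.List.pyRange 0 pgn.length 1).foldl
          (fun st i => pgnBody pgn.length st i (PySem.List.pyGetD pgn i ""))
          ([], []) =
        (PySem.List.enumerate pgn 0).foldl
          (fun st p => pgnBody pgn.length st p.1 p.2) ([], []) := by
      rw [PySem.List.enumerate_eq_map_pyRange pgn ""]
      rw [List.foldl_map]; rfl
    simp only [hlen, beq_iff_eq, if_false]
    rw [hfold, pgn_loop_inv pgn 0 pgn.length ([]) (by decide) (by simp)]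
    simp
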